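-- pv_equiv track=rewrite | github.com/1005281342/LeetCodePro | mk/main.py | helper
-- ===== SOURCE A (Python) =====
-- def helper(k, v):
--     ans = [k] * v
--     left = right = v >> 1
--     t = k
--     while left > 0:
--         left -= 1
--         t -= 1
--         ans[left] = t
--     t = k
--     while right < v - 1:
--         right += 1
--         t += 1
--         ans[right] = t
--     return ans
-- ===== SOURCE B (Python) =====
-- def helper(k, v):
--     c = v >> 1
--     return [k - c + i for i in range(v)]
-- ===== Notes on version B (the rewrite author's own statement) =====
-- stated objective: simpler
-- what changed: Replaces the preallocated list and two center-out in-place fill loops with a single closed-form comprehension ans[i] = k - (v>>1) + i over range(v).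
import Mathlib
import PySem

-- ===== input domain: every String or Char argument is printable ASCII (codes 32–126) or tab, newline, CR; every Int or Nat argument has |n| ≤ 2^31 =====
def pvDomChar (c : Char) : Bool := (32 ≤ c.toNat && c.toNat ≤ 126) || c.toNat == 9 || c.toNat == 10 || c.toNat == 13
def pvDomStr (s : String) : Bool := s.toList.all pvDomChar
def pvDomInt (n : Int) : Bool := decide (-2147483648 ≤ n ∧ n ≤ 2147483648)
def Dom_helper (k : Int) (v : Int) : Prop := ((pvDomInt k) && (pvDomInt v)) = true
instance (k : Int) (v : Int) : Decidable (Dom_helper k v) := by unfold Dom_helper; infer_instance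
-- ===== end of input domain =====

-- B replaces A's two center-out in-place fill loops by one closed-form comprehension; objective: simpler.

-- ===== PORT A =====
-- first while loop: it runs exactly `left` times (entered only while left > 0), so a Nat
-- counter is exact; a negative initial left means zero iterations, matched by Int.toNat at the call
def helperLoopL (ans : List Int) (left : Nat) (t : Int) : List Int :=
  match left with
  | 0 => ans
  | l + 1 => helperLoopL (ans.set l (t - 1)) l (t - 1)

-- second while loop: `while right < v - 1`; whenever the body runs, right+1 is ≥ 0 and in range,
-- so List.set with (right+1).toNat is exact for Python's assignment ans[right] = t
def helperLoopR (ans : List Int) (right : Int) (t : Int) (v : Int) : List Int :=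
  if right < v - 1 then
    helperLoopR (ans.set (right + 1).toNat (t + 1)) (right + 1) (t + 1) v
  else ans
termination_by (v - 1 - right).toNat
decreasing_by omega

def helper (k : Int) (v : Int) : List Int :=
  let ans := List.replicate v.toNat k          -- [k] * v ([] for v ≤ 0)
  let c := PySem.Int.floordiv v 2              -- v >> 1
  let ans := helperLoopL ans c.toNat k
  helperLoopR ans c k v

-- ===== PORT B =====
def helper_alt (k : Int) (v : Int) : List Int :=
  (PySem.List.pyRange 0 v 1).map (fun i => k - PySem.Int.floordiv v 2 + i)

-- ===== PRECONDITION & SPEC =====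
def Spec_helper (k : Int) (v : Int) (out : List Int) : Prop := out = helper_alt k v
instance (k : Int) (v : Int) (out : List Int) : Decidable (Spec_helper k v out) := by unfold Spec_helper; infer_instance

-- ===== CLAIM (what is proved, stated in full; the proofs are below) =====
def Claim_equal_helper : Prop := ∀ (k : Int) (v : Int), Dom_helper k v → Spec_helper k v (helper k v)

-- ===== LEMMAS AND PROOFS =====



-- the left loop writes t-l, …, t-1 into positions 0..l-1 and leaves the rest of the list alone
theorem helperLoopL_eq (ans : List Int) (l : Nat) (t : Int) (h : l ≤ ans.length) :
    helperLoopL ans l t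
      = (List.range l).map (fun (i : Nat) => t - (l : Int) + (i : Int)) ++ ans.drop l := by
  induction l generalizing ans t with
  | zero => simp [helperLoopL]
  | succ n ih =>
    have hn : n < ans.length := by omega
    rw [helperLoopL, ih _ _ (by simp; omega), List.set_eq_take_cons_drop _ hn]
    have htk : (ans.take n).length = n := by simp; omega
    rw [List.drop_append_of_le_length (le_of_eq htk.symm)]
    have hdt : List.drop n (List.take n ans) = [] :=
      List.drop_eq_nil_of_le (le_of_eq htk)
    rw [hdt, List.nil_append, List.range_succ]
    simp only [List.map_append, List.map_cons, List.map_nil, List.append_assoc,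
      List.cons_append, List.nil_append]
    congr 1
    · exact List.map_congr_left (fun i _ => by push_cast; ring)
    · congr 2
      push_cast; ring

-- the right loop keeps the prefix up to index `right` and writes t+1, t+2, … into the rest
theorem helperLoopR_eq (ans : List Int) (right t v : Int)
    (h0 : 0 ≤ right) (hlen : ans.length = v.toNat) (hr : right < v) :
    helperLoopR ans right t v
      = ans.take (right + 1).toNat
        ++ (List.range (v - 1 - right).toNat).map (fun (i : Nat) => t + 1 + (i : Int)) := by
  generalize hfuel : (v - 1 - right).toNat = fuel
  induction fuel generalizing ans right t with
  | zero =>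
    rw [helperLoopR]
    have hc : ¬ right < v - 1 := by omega
    rw [if_neg hc, List.range_zero, List.map_nil, List.append_nil,
      List.take_of_length_le (by omega)]
  | succ n ih =>
    rw [helperLoopR]
    have hc : right < v - 1 := by omega
    rw [if_pos hc, ih _ _ _ (by omega) (by simpa using hlen) (by omega) (by omega)]
    have hj : (right + 1).toNat < ans.length := by omega
    rw [List.set_eq_take_cons_drop _ hj]
    have htk : (ans.take (right + 1).toNat).length = (right + 1).toNat := by simp; omega
    have h2 : (right + 1 + 1).toNat = (right + 1).toNat + 1 := by omega
    rw [h2, List.take_append, htk, List.take_of_length_le (by rw [htk]; omega),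
      Nat.add_sub_cancel_left, List.take_succ_cons, List.take_zero,
      List.range_succ_eq_map, List.map_cons, List.map_map,
      List.append_assoc, List.cons_append, List.nil_append]
    congr 2
    · push_cast; ring
    · exact List.map_congr_left (fun i _ => by simp only [Function.comp_apply]; push_cast; ring)

theorem helper_eq_alt (k v : Int) : helper k v = helper_alt k v := by
  have hbody : helper k v = helperLoopR
      (helperLoopL (List.replicate v.toNat k) (PySem.Int.floordiv v 2).toNat k)
      (PySem.Int.floordiv v 2) k v := rfl
  rw [hbody]; unfold helper_alt
  by_cases hv : v ≤ 0
  · have hfd : PySem.Int.floordiv v 2 = v / 2 := PySem.Int.floordiv_eq_ediv_of_pos (by omega)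
    have hnil : List.replicate v.toNat k = ([] : List Int) := by
      rw [Int.toNat_of_nonpos hv]; rfl
    have hcz : (PySem.Int.floordiv v 2).toNat = 0 := by rw [hfd]; omega
    rw [PySem.List.pyRange_one_eq_nil (by omega), hnil, hcz]
    simp only [helperLoopL, List.map_nil]
    rw [helperLoopR]
    have : ¬ PySem.Int.floordiv v 2 < v - 1 := by rw [hfd]; omega
    rw [if_neg this]
  · replace hv : 0 < v := by omega
    set c : Int := PySem.Int.floordiv v 2 with hcdef
    have hfd : c = v / 2 := PySem.Int.floordiv_eq_ediv_of_pos (by omega)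
    have hc0 : 0 ≤ c := by rw [hfd]; omega
    have hcv : c < v := by rw [hfd]; omega
    have hcast : ((c.toNat : Int)) = c := Int.toNat_of_nonneg hc0
    rw [helperLoopL_eq _ _ _ (by simp; omega), List.drop_replicate]
    have hlen1 : ((List.range c.toNat).map (fun (i : Nat) => k - (c.toNat : Int) + (i : Int))
        ++ List.replicate (v.toNat - c.toNat) k).length = v.toNat := by
      simp; omega
    rw [helperLoopR_eq _ c k v hc0 hlen1 hcv]
    have hmaplen : ((List.range c.toNat).map
        (fun (i : Nat) => k - (c.toNat : Int) + (i : Int))).length = c.toNat := by simp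
    have ht1 : (c + 1).toNat = c.toNat + 1 := by omega
    rw [ht1, List.take_append, hmaplen, List.take_of_length_le (by rw [hmaplen]; omega),
      Nat.add_sub_cancel_left, List.take_replicate]
    have hmin : min 1 (v.toNat - c.toNat) = 1 := by omega
    rw [hmin, PySem.List.pyRange_one]
    have hsplit : (v - 0).toNat = c.toNat + ((v - 1 - c).toNat + 1) := by omega
    rw [hsplit, List.range_add]
    simp only [List.map_append, List.map_map, List.replicate_one, Function.comp_def]
    rw [List.range_succ_eq_map]
    simp only [List.map_cons, List.map_map, Function.comp_def, List.append_assoc,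
      List.cons_append, List.nil_append]
    congr 1
    · exact List.map_congr_left (fun i _ => by push_cast [hcast]; ring)
    congr 1
    · push_cast [hcast]; ring
    · exact List.map_congr_left (fun i _ => by push_cast [hcast]; ring)

-- ===== VERDICT (by name: the statement is the Claim_ definition above) =====
theorem helper_spec : Claim_equal_helper := by
  intro k v _
  unfold Spec_helper
  exact helper_eq_alt k v
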